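-- pv_equiv track=rewrite | github.com/sgalpha01/leetcode | 668. Kth Smallest Number in Multiplication Table/668. Kth Smallest Number in Multiplication Table.py | find_kth_element
-- ===== SOURCE A (Python) =====
-- def find_kth_element(m, n, k):
--     def less_eq(x):
--         return sum(min(x // i, n) for i in range(1, min(m + 1, x + 1))) >= k
--
--     start, end = 1, m * n
--     while start < end:
--         mid = (start + end) // 2
--         if not less_eq(mid):
--             start = mid + 1
--         else:
--             end = mid
--     return start
-- ===== SOURCE B (Python) =====
-- def find_kth_element(m, n, k):
--     def count(x):
--         # pairs (i, j) with 1 <= i <= m, 1 <= j <= n, i*j <= x,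
--         # counted by grouping rows with equal quotient x // i into blocks
--         limit = min(m, x)
--         if limit <= 0:
--             return 0
--         t = min(x // n, limit)          # rows 1..t are full: they contribute n each
--         total = n * t
--         i = t + 1
--         while i <= limit:
--             q = x // i                  # common quotient of the whole block
--             hi = min(x // q, limit)     # last row with this quotient
--             total += q * (hi - i + 1)
--             i = hi + 1
--         return total
--
--     start, end = 1, m * n
--     while start < end:
--         mid = (start + end) // 2
--         if count(mid) < k:
--             start = mid + 1
--         else:
--             end = mid
--     return start
-- ===== Notes on version B (the rewrite author's own statement) =====
-- stated objective: faster
-- what changed: The rank count inside the binary search no longer scans the m rows one by one: B groups rows sharing the same quotient x//i into blocks (plus one stroke for all full rows with x//i >= n) and sums each block in O(1), so each probe costs O(min(m, sqrt(x))) instead of O(min(m, x)).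
import Mathlib
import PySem

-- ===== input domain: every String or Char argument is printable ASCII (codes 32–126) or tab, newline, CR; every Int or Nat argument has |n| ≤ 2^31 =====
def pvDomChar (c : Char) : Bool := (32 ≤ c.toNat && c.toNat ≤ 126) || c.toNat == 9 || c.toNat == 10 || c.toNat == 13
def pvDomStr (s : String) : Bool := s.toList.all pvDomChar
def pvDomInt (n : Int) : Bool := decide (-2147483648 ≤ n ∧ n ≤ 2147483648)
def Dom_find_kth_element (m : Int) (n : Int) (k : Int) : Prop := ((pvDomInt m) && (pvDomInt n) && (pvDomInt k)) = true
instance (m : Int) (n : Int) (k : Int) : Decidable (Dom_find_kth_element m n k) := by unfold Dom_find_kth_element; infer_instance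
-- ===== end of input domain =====

-- B replaces A's O(m)-per-probe row-by-row rank count inside the binary search by a
-- quotient-block count (rows with equal x//i grouped), the same value in far fewer steps.


-- ===== PORT A =====
-- sum(min(x // i, n) for i in range(1, min(m + 1, x + 1)))
def sumA (m : Int) (n : Int) (x : Int) : Int :=
  ((PySem.List.pyRange 1 (min (m + 1) (x + 1))).map
    (fun i => min (PySem.Int.floordiv x i) n)).sum

-- def less_eq(x): return sum(...) >= k
def lessEqA (m : Int) (n : Int) (k : Int) (x : Int) : Bool :=
  decide (sumA m n x ≥ k)

-- while start < end: mid = (start+end)//2; if not less_eq(mid): start = mid+1 else: end = mid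
def loopA (m : Int) (n : Int) (k : Int) (s : Int) (e : Int) : Int :=
  if h : s < e then
    let mid := PySem.Int.floordiv (s + e) 2
    if lessEqA m n k mid = false then loopA m n k (mid + 1) e
    else loopA m n k s mid
  else s
termination_by (e - s).toNat
decreasing_by
  · have _hb := PySem.Int.floordiv_two_mid_bounds (le_of_lt h)
    omega
  · have _hb := PySem.Int.floordiv_two_mid_bounds (le_of_lt h)
    have hlt : PySem.Int.floordiv (s + e) 2 < e :=
      (PySem.Int.floordiv_lt_iff_lt_mul (by norm_num)).mpr (by linarith)
    omega

def find_kth_element (m : Int) (n : Int) (k : Int) : Int :=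
  loopA m n k 1 (m * n)

-- ===== PORT B =====
-- the while-loop of Source B's count: blocks of rows sharing the quotient q = x // i
-- (fuel makes the recursion total in Lean; Source B's loop needs none)
def blockLoop (x : Int) (limit : Int) : Nat → Int → Int → Int
  | 0, total, _ => total
  | fuel + 1, total, i =>
    if i ≤ limit then
      let q := PySem.Int.floordiv x i
      let hi := min (PySem.Int.floordiv x q) limit
      blockLoop x limit fuel (total + q * (hi - i + 1)) (hi + 1)
    else total

def countB (m : Int) (n : Int) (x : Int) : Int :=
  let limit := min m x
  if limit ≤ 0 then 0
  else
    let t := min (PySem.Int.floordiv x n) limit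
    blockLoop x limit (limit - t).toNat (n * t) (t + 1)

def loopB (m : Int) (n : Int) (k : Int) (s : Int) (e : Int) : Int :=
  if h : s < e then
    let mid := PySem.Int.floordiv (s + e) 2
    if countB m n mid < k then loopB m n k (mid + 1) e
    else loopB m n k s mid
  else s
termination_by (e - s).toNat
decreasing_by
  · have _hb := PySem.Int.floordiv_two_mid_bounds (le_of_lt h)
    omega
  · have _hb := PySem.Int.floordiv_two_mid_bounds (le_of_lt h)
    have hlt : PySem.Int.floordiv (s + e) 2 < e :=
      (PySem.Int.floordiv_lt_iff_lt_mul (by norm_num)).mpr (by linarith)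
    omega

def find_kth_element_alt (m : Int) (n : Int) (k : Int) : Int :=
  loopB m n k 1 (m * n)

-- ===== PRECONDITION & SPEC =====
def Spec_find_kth_element (m : Int) (n : Int) (k : Int) (out : Int) : Prop := out = find_kth_element_alt m n k
instance (m : Int) (n : Int) (k : Int) (out : Int) : Decidable (Spec_find_kth_element m n k out) := by unfold Spec_find_kth_element; infer_instance

-- ===== CLAIM (what is proved, stated in full; the proofs are below) =====
def Claim_equal_find_kth_element : Prop := ∀ (m : Int) (n : Int) (k : Int), Dom_find_kth_element m n k → Spec_find_kth_element m n k (find_kth_element m n k)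

-- ===== LEMMAS AND PROOFS =====

-- the reference rank sum: S x n limit i = Σ_{j=i..limit} min(x//j, n)
def S (x : Int) (n : Int) (limit : Int) (i : Int) : Int :=
  if i ≤ limit then min (PySem.Int.floordiv x i) n + S x n limit (i + 1) else 0
termination_by (limit + 1 - i).toNat
decreasing_by omega

theorem S_of_gt (x n limit i : Int) (h : limit < i) : S x n limit i = 0 := by
  rw [S]; simp [not_le.mpr h]


-- x//i is at least 1 when 1 <= i <= x
theorem fd_pos (x i : Int) (h1 : 1 ≤ i) (h2 : i ≤ x) : 1 ≤ PySem.Int.floordiv x i :=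
  (PySem.Int.le_floordiv_iff_mul_le (by omega)).mpr (by omega)

-- x//i is nonnegative when x is and i > 0
theorem fd_nonneg (x i : Int) (hx : 0 ≤ x) (hi : 0 < i) : 0 ≤ PySem.Int.floordiv x i :=
  (PySem.Int.le_floordiv_iff_mul_le hi).mpr (by omega)

-- i * (x // i) ≤ x for i > 0
theorem mul_fd_le (x i : Int) (hi : 0 < i) : i * PySem.Int.floordiv x i ≤ x := by
  have h := PySem.Int.floordiv_mul_add_mod x i
  have h2 := PySem.Int.mod_nonneg x hi
  nlinarith [h, h2]

-- floor division is antitone in the divisor for nonnegative dividends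
theorem fd_anti (x a b : Int) (hx : 0 ≤ x) (ha : 0 < a) (hab : a ≤ b) :
    PySem.Int.floordiv x b ≤ PySem.Int.floordiv x a := by
  have hb : 0 < b := lt_of_lt_of_le ha hab
  have h1 : x < (PySem.Int.floordiv x a + 1) * a :=
    (PySem.Int.floordiv_lt_iff_lt_mul ha).mp (lt_add_one _)
  have hq : 0 ≤ PySem.Int.floordiv x a := fd_nonneg x a hx ha
  have : x < (PySem.Int.floordiv x a + 1) * b := by nlinarith
  have := (PySem.Int.floordiv_lt_iff_lt_mul hb).mpr this
  omega

-- a constant block [i, hi] can be summed in one stroke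
theorem S_block (x n limit : Int) (c : Int) :
    ∀ (d : Nat) (i hi : Int), (hi - i).toNat = d → i ≤ hi → hi ≤ limit →
    (∀ j, i ≤ j → j ≤ hi → min (PySem.Int.floordiv x j) n = c) →
    S x n limit i = c * (hi - i + 1) + S x n limit (hi + 1) := by
  intro d
  induction d using Nat.strong_induction_on with
  | _ d ih =>
    intro i hi hd hihi hlim hconst
    rw [S]
    rw [if_pos (le_trans hihi hlim)]
    rw [hconst i le_rfl hihi]
    rcases eq_or_lt_of_le hihi with heq | hlt
    · subst heq
      ring_nf
    · have hrec := ih (hi - (i + 1)).toNat (by omega) (i + 1) hi (by omega)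
        (by omega) hlim (fun j hj1 hj2 => hconst j (by omega) hj2)
      rw [hrec]
      ring

-- the pyRange sum of A's generator equals the reference sum S
theorem sumA_eq_S (x n : Int) :
    ∀ (d : Nat) (a limit : Int), (limit + 1 - a).toNat = d →
    ((PySem.List.pyRange a (limit + 1)).map
      (fun i => min (PySem.Int.floordiv x i) n)).sum = S x n limit a := by
  intro d
  induction d using Nat.strong_induction_on with
  | _ d ih =>
    intro a limit hd
    by_cases h : a ≤ limit
    · rw [PySem.List.pyRange_one_cons (by omega)]
      rw [List.map_cons, List.sum_cons]
      rw [S, if_pos h]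
      rw [ih (limit + 1 - (a + 1)).toNat (by omega) (a + 1) limit (by omega)]
    · have : PySem.List.pyRange a (limit + 1) = [] := by
        simp [PySem.List.pyRange]
        omega
      rw [this, S]
      simp [h]

-- the block loop computes the tail of the reference sum
theorem blockLoop_eq (x n m limit : Int) (hlimit : limit = min m x)
    (hx : 1 ≤ x) (hn : 0 < n) (_hl1 : 1 ≤ limit) (hlx : limit ≤ x) :
    ∀ (fuel : Nat) (total i : Int), PySem.Int.floordiv x n < i →
    (limit + 1 - i).toNat ≤ fuel →
    blockLoop x limit fuel total i = total + S x n limit i := by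
  intro fuel
  induction fuel with
  | zero =>
    intro total i hinv hfuel
    have : limit < i := by omega
    rw [blockLoop, S_of_gt x n limit i this]
    ring
  | succ fuel ih =>
    intro total i hinv hfuel
    by_cases hile : i ≤ limit
    · have hfdnn : 0 ≤ PySem.Int.floordiv x n := fd_nonneg x n (by omega) hn
      have hi1 : 1 ≤ i := by omega
      have hix : i ≤ x := le_trans hile hlx
      have hq1 : 1 ≤ PySem.Int.floordiv x i := fd_pos x i hi1 hix
      set q := PySem.Int.floordiv x i with hqdef
      -- q ≤ n
      have hqn : q ≤ n := by
        by_contra hcon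
        have hcon' : n + 1 ≤ q := by omega
        have h1 : i * q ≤ x := mul_fd_le x i (by omega)
        have h2 : i ≤ PySem.Int.floordiv x (n + 1) :=
          (PySem.Int.le_floordiv_iff_mul_le (by omega)).mpr (by nlinarith)
        have h3 : PySem.Int.floordiv x (n + 1) ≤ PySem.Int.floordiv x n :=
          fd_anti x n (n + 1) (by omega) hn (by omega)
        omega
      set hi := min (PySem.Int.floordiv x q) limit with hhidef
      have hihi : i ≤ hi := by
        have : i ≤ PySem.Int.floordiv x q :=
          (PySem.Int.le_floordiv_iff_mul_le (by omega)).mpr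
            (by have := mul_fd_le x i (by omega); nlinarith)
        omega
      have hhil : hi ≤ limit := min_le_right _ _
      have hconst : ∀ j, i ≤ j → j ≤ hi → min (PySem.Int.floordiv x j) n = q := by
        intro j hj1 hj2
        have hj0 : 0 < j := by omega
        have hle : PySem.Int.floordiv x j ≤ q := fd_anti x i j (by omega) (by omega) hj1
        have hjq : j ≤ PySem.Int.floordiv x q := le_trans hj2 (min_le_left _ _)
        have hge : q ≤ PySem.Int.floordiv x j :=
          (PySem.Int.le_floordiv_iff_mul_le hj0).mpr
            (by
              have := (PySem.Int.le_floordiv_iff_mul_le (show (0:Int) < q by omega)).mp hjq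
              nlinarith)
        have : PySem.Int.floordiv x j = q := le_antisymm hle hge
        rw [this]
        exact min_eq_left hqn
      have hS := S_block x n limit q (hi - i).toNat i hi rfl hihi hhil hconst
      rw [blockLoop, if_pos hile]
      rw [ih (total + q * (hi - i + 1)) (hi + 1) (by omega) (by omega)]
      rw [hS]
      ring
    · rw [blockLoop, if_neg hile, S_of_gt x n limit i (by omega)]
      ring

-- Source B's count equals the reference sum for positive m, n and x ≥ 1
theorem countB_eq (m n x : Int) (hm : 0 < m) (hn : 0 < n) (hx : 1 ≤ x) :
    countB m n x = S x n (min m x) 1 := by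
  have hl1 : 1 ≤ min m x := by omega
  have hlx : min m x ≤ x := min_le_right _ _
  have hfdnn : 0 ≤ PySem.Int.floordiv x n := fd_nonneg x n (by omega) hn
  unfold countB
  rw [if_neg (by omega)]
  rcases le_total (PySem.Int.floordiv x n) (min m x) with hcase | hcase
  · have ht : min (PySem.Int.floordiv x n) (min m x) = PySem.Int.floordiv x n :=
      min_eq_left hcase
    rw [ht]
    set t := PySem.Int.floordiv x n with htdef
    rcases eq_or_lt_of_le hfdnn with h0 | h1
    · -- t = 0: no full rows
      rw [blockLoop_eq x n m (min m x) rfl hx hn hl1 hlx _ _ _ (by omega) (by omega)]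
      rw [← h0]
      norm_num
    · -- t ≥ 1: rows 1..t are full (value n), block lemma with c = n
      have hSfull : S x n (min m x) 1 = n * (t - 1 + 1) + S x n (min m x) (t + 1) := by
        apply S_block x n (min m x) n (t - 1).toNat 1 t (by omega) (by omega) hcase
        intro j hj1 hj2
        have hnle : n ≤ PySem.Int.floordiv x j :=
          (PySem.Int.le_floordiv_iff_mul_le (by omega)).mpr
            (by
              have := (PySem.Int.le_floordiv_iff_mul_le hn).mp hj2
              nlinarith)
        omega
      rw [blockLoop_eq x n m (min m x) rfl hx hn hl1 hlx _ _ _ (by omega) (by omega)]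
      rw [hSfull]
      ring
  · have ht : min (PySem.Int.floordiv x n) (min m x) = min m x := min_eq_right hcase
    rw [ht]
    have hSfull : S x n (min m x) 1 =
        n * (min m x - 1 + 1) + S x n (min m x) (min m x + 1) := by
      apply S_block x n (min m x) n (min m x - 1).toNat 1 (min m x) (by omega) hl1 le_rfl
      intro j hj1 hj2
      have hnle : n ≤ PySem.Int.floordiv x j :=
        (PySem.Int.le_floordiv_iff_mul_le (by omega)).mpr
          (by
            have := (PySem.Int.le_floordiv_iff_mul_le hn).mp (le_trans hj2 hcase)
            nlinarith)
      omega
    rw [S_of_gt x n (min m x) (min m x + 1) (by omega)] at hSfull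
    show blockLoop x (min m x) (min m x - min m x).toNat (n * min m x) (min m x + 1)
      = S x n (min m x) 1
    have hz : (min m x - min m x).toNat = 0 := by omega
    rw [hz, blockLoop, hSfull]
    ring

-- A's generator sum equals Source B's count on every probe the search can make
theorem count_eq (m n x : Int) (hx : 1 ≤ x) (hmn : m ≤ 0 ∨ (0 < m ∧ 0 < n)) :
    sumA m n x = countB m n x := by
  rcases hmn with hm | ⟨hm, hn⟩
  · unfold sumA countB
    have h1 : PySem.List.pyRange 1 (min (m + 1) (x + 1)) = [] := by
      simp [PySem.List.pyRange]
      omega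
    rw [h1, if_pos (by omega)]
    simp
  · have hmin : min (m + 1) (x + 1) = min m x + 1 := by omega
    unfold sumA
    rw [hmin, sumA_eq_S x n (min m x + 1 - 1).toNat 1 (min m x) rfl]
    exact (countB_eq m n x hm hn hx).symm

-- both binary searches coincide whenever the probes coincide
theorem loop_eq (m n k : Int) (H : ∀ x, 1 ≤ x → sumA m n x = countB m n x) :
    ∀ (d : Nat) (s e : Int), (e - s).toNat = d → 1 ≤ s →
    loopA m n k s e = loopB m n k s e := by
  intro d
  induction d using Nat.strong_induction_on with
  | _ d ih =>
    intro s e hd hs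
    by_cases h : s < e
    · have hb := PySem.Int.floordiv_two_mid_bounds (le_of_lt h)
      have hlt : PySem.Int.floordiv (s + e) 2 < e :=
        (PySem.Int.floordiv_lt_iff_lt_mul (by norm_num)).mpr (by omega)
      rw [loopA, loopB, dif_pos h, dif_pos h]
      have hcond : (lessEqA m n k (PySem.Int.floordiv (s + e) 2) = false) ↔
          (countB m n (PySem.Int.floordiv (s + e) 2) < k) := by
        unfold lessEqA
        rw [H (PySem.Int.floordiv (s + e) 2) (by omega)]
        simp
      by_cases hc : countB m n (PySem.Int.floordiv (s + e) 2) < k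
      · rw [if_pos (hcond.mpr hc), if_pos hc]
        exact ih (e - (PySem.Int.floordiv (s + e) 2 + 1)).toNat (by omega) _ e (by omega) (by omega)
      · rw [if_neg (fun hf => hc (hcond.mp hf)), if_neg hc]
        exact ih (PySem.Int.floordiv (s + e) 2 - s).toNat (by omega) s _ (by omega) hs
    · rw [loopA, loopB, dif_neg h, dif_neg h]

-- a search over an empty interval returns its left end, on both sides
theorem loopA_stop (m n k s e : Int) (h : ¬ s < e) : loopA m n k s e = s := by
  rw [loopA, dif_neg h]

theorem loopB_stop (m n k s e : Int) (h : ¬ s < e) : loopB m n k s e = s := by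
  rw [loopB, dif_neg h]

-- ===== VERDICT (by name: the statement is the Claim_ definition above) =====
theorem find_kth_element_spec : Claim_equal_find_kth_element := by
  intro m n k _
  unfold Spec_find_kth_element find_kth_element find_kth_element_alt
  by_cases hm : m ≤ 0
  · exact loop_eq m n k (fun x hx => count_eq m n x hx (Or.inl hm)) (m * n - 1).toNat 1 (m * n) rfl le_rfl
  · by_cases hn : 0 < n
    · exact loop_eq m n k (fun x hx => count_eq m n x hx (Or.inr ⟨by omega, hn⟩)) (m * n - 1).toNat 1 (m * n) rfl le_rfl
    · have he : m * n ≤ 0 := mul_nonpos_of_nonneg_of_nonpos (by omega) (by omega)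
      rw [loopA_stop m n k 1 (m * n) (by omega), loopB_stop m n k 1 (m * n) (by omega)]
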